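-- pv_equiv track=rewrite | github.com/milosptr/discrete_math_relations | relations.py | aces_in_relation_c
-- ===== SOURCE A (Python) =====
-- def aces_in_relation_c(A: list[int]) -> int:
--   # we find the length of the list A
--   n: int = len(A)
--   aces: int = 0
--
--   if n == 0:
--     return 0
--
--   for a in range(n):
--     for b in range(n):
--        if A[a] >= A[b]:
--           aces += 1
--
--   return aces
-- ===== SOURCE B (Python) =====
-- def aces_in_relation_c(A: list[int]) -> int:
--     # sort once, then scan runs of equal values: a run of length L ending at
--     # sorted position j (1-based) contributes L * j pairs (each of its L
--     # elements is >= exactly j elements).  O(n log n) instead of O(n^2).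
--     s = sorted(A)
--     n = len(s)
--     total = 0
--     i = 0
--     while i < n:
--         j = i + 1
--         while j < n and s[j] == s[i]:
--             j += 1
--         total += (j - i) * j
--         i = j
--     return total
-- ===== Notes on version B (the rewrite author's own statement) =====
-- stated objective: faster
-- what changed: Replaces A's nested O(n^2) pair comparison with sorting once and a single scan over runs of equal values, where a run of length L ending at sorted position j contributes L*j.
import Mathlib
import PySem

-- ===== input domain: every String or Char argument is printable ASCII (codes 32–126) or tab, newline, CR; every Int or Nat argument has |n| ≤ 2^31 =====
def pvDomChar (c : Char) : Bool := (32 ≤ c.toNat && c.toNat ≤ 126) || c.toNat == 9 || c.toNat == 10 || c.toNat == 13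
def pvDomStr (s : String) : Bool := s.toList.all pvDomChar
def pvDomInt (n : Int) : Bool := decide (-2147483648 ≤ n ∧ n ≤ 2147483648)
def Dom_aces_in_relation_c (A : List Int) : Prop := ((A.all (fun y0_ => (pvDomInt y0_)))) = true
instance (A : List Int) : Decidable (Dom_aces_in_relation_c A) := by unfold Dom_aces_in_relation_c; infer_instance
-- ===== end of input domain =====

-- B sorts once and scans runs of equal values (a run of length L ending at sorted
-- position j contributes L*j), replacing A's double loop with a sort and one pass.

-- ===== PORT A =====
def aces_in_relation_c (A : List Int) : Int :=
  let n : Int := PySem.List.len A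
  let aces : Int := 0
  if n = 0 then 0
  else
    (PySem.List.pyRange 0 n 1).foldl (fun aces a =>
      (PySem.List.pyRange 0 n 1).foldl (fun aces b =>
        if PySem.List.pyGetD A a 0 ≥ PySem.List.pyGetD A b 0 then aces + 1 else aces)
        aces) aces

-- ===== PORT B =====
-- Source B's outer while over i with the inner 'while j < n and s[j] == s[i]' walk:
-- the walk is the takeWhile/dropWhile split of the tail at the current value,
-- i carries the number of elements already consumed, total the running answer
def grpLoop : List Int → Int → Int → Int
  | [], _, total => total
  | x :: rest, i, total =>
    let run := rest.takeWhile (fun y => y == x)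
    let L : Int := 1 + run.length
    grpLoop (rest.dropWhile (fun y => y == x)) (i + L) (total + L * (i + L))
termination_by s _ _ => s.length
decreasing_by
  simpa using Nat.lt_succ_of_le (List.length_dropWhile_le (fun y => y == x) rest)

def aces_in_relation_c_alt (A : List Int) : Int :=
  grpLoop (PySem.List.sorted A (fun x => x) false) 0 0

-- ===== PRECONDITION & SPEC =====
def Spec_aces_in_relation_c (A : List Int) (out : Int) : Prop := out = aces_in_relation_c_alt A
instance (A : List Int) (out : Int) : Decidable (Spec_aces_in_relation_c A out) := by unfold Spec_aces_in_relation_c; infer_instance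

-- ===== CLAIM (what is proved, stated in full; the proofs are below) =====
def Claim_equal_aces_in_relation_c : Prop := ∀ (A : List Int), Dom_aces_in_relation_c A → Spec_aces_in_relation_c A (aces_in_relation_c A)

-- ===== LEMMAS AND PROOFS =====

-- A's double loop is the sum over x ∈ A of the number of elements ≤ x
lemma aces_eq_sum (A : List Int) :
    aces_in_relation_c A
      = (A.map (fun x => (A.countP (fun y => y ≤ x) : Int))).sum := by
  unfold aces_in_relation_c
  rcases A with _ | ⟨a0, A'⟩
  · simp [PySem.List.len]
  · have hlen : PySem.List.len (a0 :: A') ≠ 0 := by simp [PySem.List.len_eq]; omega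
    rw [if_neg hlen]
    rw [PySem.List.foldl_pyRange_zero_pyGetD (a0 :: A') 0
      (fun acc x => (PySem.List.pyRange 0 (PySem.List.len (a0 :: A')) 1).foldl
        (fun acc b => if x ≥ PySem.List.pyGetD (a0 :: A') b 0 then acc + 1 else acc) acc) 0]
    have hf : ∀ (acc x : Int),
        (PySem.List.pyRange 0 (PySem.List.len (a0 :: A')) 1).foldl
          (fun acc b => if x ≥ PySem.List.pyGetD (a0 :: A') b 0 then acc + 1 else acc) acc
        = acc + ((a0 :: A').countP (fun y => y ≤ x) : Int) := by
      intro acc x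
      rw [PySem.List.foldl_pyRange_zero_pyGetD (a0 :: A') 0
        (fun acc y => if x ≥ y then acc + 1 else acc) acc]
      rw [show (fun (acc : Int) (y : Int) => if x ≥ y then acc + 1 else acc)
            = (fun acc y => if (decide (y ≤ x)) = true then acc + 1 else acc) by
          funext acc y; simp [ge_iff_le]]
      rw [PySem.List.foldl_count_if]
    simp only [hf]
    rw [PySem.List.foldl_add]
    simp

-- run-scan invariant: on a sorted list, grpLoop accumulates Σ_x (i + #{y ≤ x})
lemma grpLoop_aux : ∀ (n : Nat) (s : List Int), s.length ≤ n → s.Pairwise (· ≤ ·) →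
    ∀ (i total : Int),
      grpLoop s i total
        = total + (s.map (fun x => i + (s.countP (fun y => y ≤ x) : Int))).sum := by
  intro n
  induction n with
  | zero =>
    intro s hlen _ i total
    have : s = [] := List.eq_nil_of_length_eq_zero (Nat.le_zero.mp hlen)
    subst this; simp [grpLoop]
  | succ m ih =>
    intro s hlen hs i total
    rcases s with _ | ⟨x, rest⟩
    · simp [grpLoop]
    · set t := rest.takeWhile (fun y => y == x) with ht_def
      set d := rest.dropWhile (fun y => y == x) with hd_def
      have htd : t ++ d = rest := List.takeWhile_append_dropWhile
      have hx : ∀ w ∈ rest, x ≤ w := fun w hw => List.rel_of_pairwise_cons hs hw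
      have hrest : rest.Pairwise (· ≤ ·) := List.Pairwise.of_cons hs
      have ht : ∀ w ∈ t, w = x := by
        intro w hw
        have := List.mem_takeWhile_imp hw
        simpa using this
      have hd : ∀ z ∈ d, x < z := by
        rcases hdE : d with _ | ⟨h, d'⟩
        · simp
        · have hh : (h == x) = false := by
            have := List.head?_dropWhile_not (fun y => y == x) rest
            rw [← hd_def, hdE] at this
            simpa using this
          have hhx : x < h := by
            have hhm : h ∈ rest := by rw [← htd, hdE]; simp
            have := hx h hhm
            have hne : h ≠ x := by simpa using hh
            omega
          intro z hz
          rcases List.mem_cons.mp hz with rfl | hz'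
          · exact hhx
          · have hdp : d.Pairwise (· ≤ ·) :=
              List.Pairwise.sublist (List.dropWhile_sublist _) hrest
            rw [hdE] at hdp
            have : h ≤ z := List.rel_of_pairwise_cons hdp hz'
            omega
      have hcountd : d.countP (fun y => y ≤ x) = 0 := by
        rw [List.countP_eq_zero]
        intro z hz
        simpa using not_le.mpr (hd z hz)
      have hcountt : ∀ z : Int, x ≤ z → t.countP (fun y => y ≤ z) = t.length := by
        intro z hxz
        rw [List.countP_eq_length]
        intro w hw
        simp [ht w hw, hxz]
      have hc1 : ((x :: rest).countP (fun y => y ≤ x)) = 1 + t.length := by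
        rw [List.countP_cons, ← htd, List.countP_append, hcountd, hcountt x le_rfl]
        simp; omega
      have hc2 : ∀ z ∈ d, ((x :: rest).countP (fun y => y ≤ z))
          = 1 + t.length + d.countP (fun y => y ≤ z) := by
        intro z hz
        have hxz : x ≤ z := le_of_lt (hd z hz)
        rw [List.countP_cons, ← htd, List.countP_append, hcountt z hxz]
        simp [hxz]; omega
      have hstep : grpLoop (x :: rest) i total
          = grpLoop d (i + (1 + (t.length : Int)))
              (total + (1 + (t.length : Int)) * (i + (1 + (t.length : Int)))) := by
        rw [grpLoop]
      set L : Int := 1 + (t.length : Int) with hL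
      have hdlen : d.length ≤ m := by
        have h1 : d.length ≤ rest.length := List.length_dropWhile_le _ _
        simp at hlen; omega
      have hdp : d.Pairwise (· ≤ ·) := List.Pairwise.sublist (List.dropWhile_sublist _) hrest
      rw [hstep, ih d hdlen hdp]
      have hrw : rest.map (fun w => i + ((x :: rest).countP (fun y => y ≤ w) : Int))
          = t.map (fun _ => i + L) ++ d.map (fun z => (i + L) + (d.countP (fun y => y ≤ z) : Int)) := by
        rw [← htd, List.map_append]
        congr 1
        · apply List.map_congr_left
          intro w hw
          rw [ht w hw, show ((x :: (t ++ d)).countP (fun y => y ≤ x)) = 1 + t.length from (htd ▸ hc1)]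
          push_cast [hL]; ring
        · apply List.map_congr_left
          intro z hz
          rw [show ((x :: (t ++ d)).countP (fun y => y ≤ z)) = 1 + t.length + d.countP (fun y => y ≤ z) from (htd ▸ hc2 z hz)]
          push_cast [hL]; ring
      rw [List.map_cons, List.sum_cons, hrw]
      rw [List.sum_append]
      have hconst : (t.map (fun _ => i + L)).sum = (t.length : Int) * (i + L) := by
        simp
      rw [hc1, hconst]
      push_cast [hL]
      ring

-- ===== VERDICT (by name: the statement is the Claim_ definition above) =====
theorem aces_in_relation_c_spec : Claim_equal_aces_in_relation_c := by
  intro A _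
  unfold Spec_aces_in_relation_c aces_in_relation_c_alt
  set s := PySem.List.sorted A (fun x => x) false with hs_def
  have hp : s.Perm A := PySem.List.sorted_perm A (fun x => x) false
  have hsp : s.Pairwise (· ≤ ·) := by
    simpa using PySem.List.sorted_pairwise A (fun x => x)
  rw [aces_eq_sum, grpLoop_aux s.length s le_rfl hsp 0 0]
  have hfun : (s.map (fun x => (0 : Int) + (s.countP (fun y => y ≤ x) : Int)))
      = s.map (fun x => (A.countP (fun y => y ≤ x) : Int)) := by
    apply List.map_congr_left
    intro x _
    rw [hp.countP_eq]
    ring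
  rw [hfun, (hp.map (fun x => (A.countP (fun y => y ≤ x) : Int))).sum_eq]
  ring
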